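-- pv_equiv track=rewrite | github.com/YushanZhu/K3M | vilbert_k3m/datasets/concept_cap_dataset_struc.py | index_pv
-- ===== SOURCE A (Python) =====
-- def index_pv(tokens):
--     # [cls_token_id] + 真token_ids + [sep_token_id].
--     #[cls, 6132, 7305, 6199, 131, 2861, 7216, 132, xxx, xxx, 131, xxx, xxx, xxx, 132...
--     index_131=[]#[4,10]
--     index_132=[]#[7,14]
--     for i,tok_id in enumerate(tokens):# : ;
--         if tok_id==131:
--             index_131.append(i)#:
--         if tok_id==132:
--             index_132.append(i)#;
--     if len(index_132)==len(index_131):#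
--         pass
--     elif len(index_132)==len(index_131)-1:#
--         index_131=index_131[:-1]#
--     else: #
--         index_131=[]
--         index_132=[]
--
--     index_p=[]
--     index_v=[]
--     pv_begin=1
--     for idx131, idx132 in zip(index_131, index_132):
--         index_p.append([pv_begin, idx131])#[[1,4],[8,10]]
--         index_v.append([idx131+1, idx132])#[[5,7],[11,14]]
--         pv_begin = idx132+1#8
--
--     return index_p, index_v
-- ===== SOURCE B (Python) =====
-- def index_pv(tokens):
--     # Online single pass: pending queues of unmatched markers; a span pair is
--     # emitted as soon as a 131 and a 132 are both available, in occurrence order.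
--     # Validity is decided from the leftover queues at the end.
--     pending_p = []
--     pending_v = []
--     index_p = []
--     index_v = []
--     begin = 1
--     for i, tok_id in enumerate(tokens):
--         if tok_id == 131:
--             pending_p.append(i)
--         if tok_id == 132:
--             pending_v.append(i)
--         if pending_p and pending_v:
--             a = pending_p.pop(0)
--             b = pending_v.pop(0)
--             index_p.append([begin, a])
--             index_v.append([a + 1, b])
--             begin = b + 1
--     if pending_v or len(pending_p) > 1:
--         return [], []
--     return index_p, index_v
-- ===== Notes on version B (the rewrite author's own statement) =====
-- stated objective: alternative
-- what changed: Replaces A's staged algorithm (collect all 131/132 positions, reconcile the two lists' lengths globally, then re-walk them threading pv_begin) with a single online pass that keeps pending queues of unmatched markers, emits each span pair the moment a 131/132 pair completes, and decides validity from the leftover queue sizes at the end.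
import Mathlib
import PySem

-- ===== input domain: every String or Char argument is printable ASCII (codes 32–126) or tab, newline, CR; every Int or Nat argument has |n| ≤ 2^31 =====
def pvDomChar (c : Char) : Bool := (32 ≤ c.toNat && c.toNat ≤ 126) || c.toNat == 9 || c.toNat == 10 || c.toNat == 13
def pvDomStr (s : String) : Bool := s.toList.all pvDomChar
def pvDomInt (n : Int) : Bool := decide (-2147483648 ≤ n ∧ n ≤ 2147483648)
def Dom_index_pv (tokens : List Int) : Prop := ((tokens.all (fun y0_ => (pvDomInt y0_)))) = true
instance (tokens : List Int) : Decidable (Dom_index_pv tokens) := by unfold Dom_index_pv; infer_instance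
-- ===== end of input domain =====

-- B replaces A's staged collect/reconcile/re-walk algorithm by a single online pass with
-- pending queues, emitting each span pair as soon as it completes (objective: alternative).

-- ===== PORT A =====
-- loop body of A's first for-loop (two independent `if`s over the same state)
def stepScan (st : List Int × List Int) (p : Int × Int) : List Int × List Int :=
  let st1 := if p.2 == 131 then (st.1 ++ [p.1], st.2) else st
  if p.2 == 132 then (st1.1, st1.2 ++ [p.1]) else st1

-- loop body of A's second for-loop, threading (index_p, index_v, pv_begin)
def stepPV (st : List (List Int) × List (List Int) × Int) (p : Int × Int) :
    List (List Int) × List (List Int) × Int :=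
  (st.1 ++ [[st.2.2, p.1]], st.2.1 ++ [[p.1 + 1, p.2]], p.2 + 1)

def index_pv (tokens : List Int) : List (List Int) × List (List Int) :=
  let st := (PySem.List.enumerate tokens 0).foldl stepScan ([], [])
  let index_131 := st.1
  let index_132 := st.2
  let pr :=
    if (index_132.length : Int) = (index_131.length : Int) then (index_131, index_132)
    else if (index_132.length : Int) = (index_131.length : Int) - 1 then
      (PySem.List.slice index_131 none (some (-1)), index_132)
    else ([], [])
  let res := (pr.1.zip pr.2).foldl stepPV ([], [], 1)
  (res.1, res.2.1)

-- ===== PORT B =====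
-- loop body of B: state (pending_p, pending_v, index_p, index_v, begin)
def stepB (st : List Int × List Int × List (List Int) × List (List Int) × Int) (p : Int × Int) :
    List Int × List Int × List (List Int) × List (List Int) × Int :=
  let q1 := if p.2 == 131 then st.1 ++ [p.1] else st.1
  let q2 := if p.2 == 132 then st.2.1 ++ [p.1] else st.2.1
  match q1, q2 with
  | a :: q1', b :: q2' =>
      (q1', q2', st.2.2.1 ++ [[st.2.2.2.2, a]], st.2.2.2.1 ++ [[a + 1, b]], b + 1)
  | q1, q2 => (q1, q2, st.2.2.1, st.2.2.2.1, st.2.2.2.2)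

def index_pv_alt (tokens : List Int) : List (List Int) × List (List Int) :=
  let st := (PySem.List.enumerate tokens 0).foldl stepB ([], [], [], [], 1)
  if !st.2.1.isEmpty || st.1.length > 1 then ([], [])
  else (st.2.2.1, st.2.2.2.1)

-- ===== PRECONDITION & SPEC =====
def Spec_index_pv (tokens : List Int) (out : List (List Int) × List (List Int)) : Prop := out = index_pv_alt tokens
instance (tokens : List Int) (out : List (List Int) × List (List Int)) : Decidable (Spec_index_pv tokens out) := by unfold Spec_index_pv; infer_instance

-- ===== CLAIM (what is proved, stated in full; the proofs are below) =====
def Claim_equal_index_pv : Prop := ∀ (tokens : List Int), Dom_index_pv tokens → Spec_index_pv tokens (index_pv tokens)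

-- ===== LEMMAS AND PROOFS =====

-- A's scan loop produces exactly the two filtered index lists.
lemma scan_eq (l : List (Int × Int)) (a b : List Int) :
    l.foldl stepScan (a, b) =
      (a ++ (l.filter (fun p => p.2 == 131)).map (·.1),
       b ++ (l.filter (fun p => p.2 == 132)).map (·.1)) := by
  induction l generalizing a b with
  | nil => simp
  | cons p l ih =>
    by_cases h1 : p.2 = 131 <;> by_cases h2 : p.2 = 132 <;>
      simp [stepScan, h1, h2, ih]

-- B's online fold, characterised: the leftover queues are the suffixes of the two
-- filtered index lists past their common length, and the emitted spans are A's
-- stepPV-fold over their zip.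
lemma B_inv (l : List (Int × Int)) (q1 q2 : List Int)
    (ps vs : List (List Int)) (b : Int) (h : q1 = [] ∨ q2 = []) :
    l.foldl stepB (q1, q2, ps, vs, b) =
      (let f1 := q1 ++ (l.filter (fun p => p.2 == 131)).map (·.1)
       let f2 := q2 ++ (l.filter (fun p => p.2 == 132)).map (·.1)
       let m := min f1.length f2.length
       let r := (f1.zip f2).foldl stepPV (ps, vs, b)
       (f1.drop m, f2.drop m, r.1, r.2.1, r.2.2)) := by
  induction l generalizing q1 q2 ps vs b with
  | nil =>
    rcases h with h | h <;> subst h <;> simp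
  | cons p t ih =>
    by_cases h1 : p.2 = 131
    · have h2 : ¬ p.2 = 132 := by omega
      rcases h with hq | hq
      · subst hq
        cases q2 with
        | nil =>
          have hstep : stepB (([] : List Int), ([] : List Int), ps, vs, b) p
              = ([p.1], [], ps, vs, b) := by simp [stepB, h1]
          rw [List.foldl_cons, hstep, ih [p.1] [] ps vs b (Or.inr rfl)]
          simp [h1]
        | cons b0 q2' =>
          have hstep : stepB (([] : List Int), b0 :: q2', ps, vs, b) p
              = ([], q2', ps ++ [[b, p.1]], vs ++ [[p.1 + 1, b0]], b0 + 1) := by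
            simp [stepB, h1]
          rw [List.foldl_cons, hstep,
            ih [] q2' (ps ++ [[b, p.1]]) (vs ++ [[p.1 + 1, b0]]) (b0 + 1) (Or.inl rfl)]
          simp [h1, stepPV, Nat.succ_min_succ]
      · subst hq
        have hstep : stepB (q1, ([] : List Int), ps, vs, b) p
            = (q1 ++ [p.1], [], ps, vs, b) := by
          simp only [stepB, h1]
          cases hq1 : q1 ++ [p.1] with
          | nil => simp at hq1
          | cons a q1' => simp
        rw [List.foldl_cons, hstep, ih (q1 ++ [p.1]) [] ps vs b (Or.inr rfl)]
        simp [h1]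
    · by_cases h2 : p.2 = 132
      · rcases h with hq | hq
        · subst hq
          have hstep : stepB (([] : List Int), q2, ps, vs, b) p
              = ([], q2 ++ [p.1], ps, vs, b) := by
            simp only [stepB, h2]
            cases hq2 : q2 ++ [p.1] with
            | nil => simp at hq2
            | cons b0 q2' => simp
          rw [List.foldl_cons, hstep, ih [] (q2 ++ [p.1]) ps vs b (Or.inl rfl)]
          simp [h2]
        · subst hq
          cases q1 with
          | nil =>
            have hstep : stepB (([] : List Int), ([] : List Int), ps, vs, b) p
                = ([], [p.1], ps, vs, b) := by simp [stepB, h2]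
            rw [List.foldl_cons, hstep, ih [] [p.1] ps vs b (Or.inl rfl)]
            simp [h2]
          | cons a q1' =>
            have hstep : stepB (a :: q1', ([] : List Int), ps, vs, b) p
                = (q1', [], ps ++ [[b, a]], vs ++ [[a + 1, p.1]], p.1 + 1) := by
              simp [stepB, h2]
            rw [List.foldl_cons, hstep,
              ih q1' [] (ps ++ [[b, a]]) (vs ++ [[a + 1, p.1]]) (p.1 + 1) (Or.inr rfl)]
            simp [h2, stepPV, Nat.succ_min_succ]
      · rcases h with hq | hq
        · subst hq
          have hstep : stepB (([] : List Int), q2, ps, vs, b) p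
              = ([], q2, ps, vs, b) := by
            simp only [stepB]
            cases q2 <;> simp [h1, h2]
          rw [List.foldl_cons, hstep, ih [] q2 ps vs b (Or.inl rfl)]
          simp [h1, h2]
        · subst hq
          have hstep : stepB (q1, ([] : List Int), ps, vs, b) p
              = (q1, [], ps, vs, b) := by
            simp only [stepB]
            cases q1 <;> simp [h1, h2]
          rw [List.foldl_cons, hstep, ih q1 [] ps vs b (Or.inr rfl)]
          simp [h1, h2]

-- zip ignores the unmatched last element of the longer first list.
lemma zip_dropLast (l1 l2 : List Int) (h : l1.length = l2.length + 1) :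
    l1.zip l2 = l1.dropLast.zip l2 := by
  induction l1 generalizing l2 with
  | nil => simp at h
  | cons x l1' ih =>
    cases l2 with
    | nil =>
      cases l1' with
      | nil => simp
      | cons _ _ => simp at h
    | cons y l2' =>
      cases l1' with
      | nil => simp at h
      | cons x2 l1'' =>
        have h' : (x2 :: l1'').length = l2'.length + 1 := by simpa using h
        simp [List.dropLast_cons_of_ne_nil, ih l2' h']

-- ===== VERDICT (by name: the statement is the Claim_ definition above) =====
theorem index_pv_spec : Claim_equal_index_pv := by
  intro tokens _
  unfold Spec_index_pv index_pv index_pv_alt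
  rw [scan_eq, B_inv _ _ _ _ _ _ (Or.inl rfl)]
  simp only [List.nil_append]
  set l1 := ((PySem.List.enumerate tokens 0).filter (fun p => p.2 == 131)).map (·.1) with hl1
  set l2 := ((PySem.List.enumerate tokens 0).filter (fun p => p.2 == 132)).map (·.1) with hl2
  by_cases heq : (l2.length : Int) = (l1.length : Int)
  · have hn : l2.length = l1.length := by exact_mod_cast heq
    simp [hn, List.drop_length]
  · by_cases hm1 : (l2.length : Int) = (l1.length : Int) - 1
    · have hn : l1.length = l2.length + 1 := by omega
      have hmin : min l1.length l2.length = l2.length := by omega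
      simp only [if_neg heq, if_pos hm1, hmin]
      rw [PySem.List.slice_to_neg_one, ← zip_dropLast l1 l2 hn]
      have hd1 : (l1.drop l2.length).length = 1 := by simp [hn]
      have hd2 : l2.drop l2.length = [] := by simp
      simp [hd1, hd2]
    · simp only [if_neg heq, if_neg hm1]
      have hne : l2.length ≠ l1.length := fun hh => heq (by exact_mod_cast hh)
      have hne2 : l1.length ≠ l2.length + 1 := by
        intro hh; exact hm1 (by rw [hh]; push_cast; ring)
      split_ifs with hc
      · simp
      · exfalso
        simp [List.drop_eq_nil_iff] at hc
        omega
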